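-- pv_equiv track=rewrite | github.com/Sathvik33/Job_Scraper | process_data.py | _analyze_cluster_patterns
-- ===== SOURCE A (Python) =====
-- def _analyze_cluster_patterns(titles):
--     """Analyze title patterns to name discovered roles"""
--     common_patterns = {
--         'Backend': ['backend', 'back-end', 'server', 'api', 'database'],
--         'Frontend': ['frontend', 'front-end', 'ui', 'ux', 'react', 'angular', 'vue'],
--         'Full Stack': ['full stack', 'full-stack', 'fullstack'],
--         'DevOps': ['devops', 'sre', 'cloud', 'infrastructure', 'deployment'],
--         'Data': ['data', 'analytics', 'analysis', 'bi', 'database'],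
--         'ML/AI': ['machine learning', 'ml', 'ai', 'artificial intelligence', 'deep learning'],
--         'Mobile': ['mobile', 'android', 'ios', 'react native', 'flutter'],
--         'QA': ['qa', 'test', 'quality', 'automation']
--     }
--
--     title_text = ' '.join([str(t) for t in titles]).lower()
--     scores = {}
--
--     for pattern, keywords in common_patterns.items():
--         score = sum(1 for keyword in keywords if keyword in title_text)
--         scores[pattern] = score
--
--     if scores:
--         best_pattern = max(scores, key=scores.get)
--         if scores[best_pattern] > 0:
--             return f"{best_pattern} Developer"
--
--     return "Software Engineer"
-- ===== SOURCE B (Python) =====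
-- def _analyze_cluster_patterns(titles):
--     """Analyze title patterns to name discovered roles"""
--     common_patterns = [
--         ('Backend', ['backend', 'back-end', 'server', 'api', 'database']),
--         ('Frontend', ['frontend', 'front-end', 'ui', 'ux', 'react', 'angular', 'vue']),
--         ('Full Stack', ['full stack', 'full-stack', 'fullstack']),
--         ('DevOps', ['devops', 'sre', 'cloud', 'infrastructure', 'deployment']),
--         ('Data', ['data', 'analytics', 'analysis', 'bi', 'database']),
--         ('ML/AI', ['machine learning', 'ml', 'ai', 'artificial intelligence', 'deep learning']),
--         ('Mobile', ['mobile', 'android', 'ios', 'react native', 'flutter']),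
--         ('QA', ['qa', 'test', 'quality', 'automation']),
--     ]
--
--     text = ' '.join(str(t) for t in titles).lower()
--
--     def score(kws):
--         # recursion on the keyword list
--         if not kws:
--             return 0
--         return (1 if kws[0] in text else 0) + score(kws[1:])
--
--     def best(items):
--         # recursion on the pattern list: compare the head against the best of the
--         # tail; '>=' lets the earlier pattern win ties (max's first-occurrence rule)
--         if not items:
--             return (None, 0)
--         name, kws = items[0]
--         bp, bs = best(items[1:])
--         s = score(kws)
--         return (name, s) if s >= bs else (bp, bs)
--
--     bp, bs = best(common_patterns)
--     return f"{bp} Developer" if bs > 0 else "Software Engineer"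
-- ===== Notes on version B (the rewrite author's own statement) =====
-- stated objective: alternative
-- what changed: Replaces A's dict-building loop plus max(scores, key=scores.get) with pure structural recursion: score(kws) recurses over the keyword list and best(items) recurses over the pattern list, comparing the head against the best of the tail with '>=' so the earlier pattern wins ties (max's first-occurrence rule); no dict, no max, no loops.
import Mathlib
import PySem

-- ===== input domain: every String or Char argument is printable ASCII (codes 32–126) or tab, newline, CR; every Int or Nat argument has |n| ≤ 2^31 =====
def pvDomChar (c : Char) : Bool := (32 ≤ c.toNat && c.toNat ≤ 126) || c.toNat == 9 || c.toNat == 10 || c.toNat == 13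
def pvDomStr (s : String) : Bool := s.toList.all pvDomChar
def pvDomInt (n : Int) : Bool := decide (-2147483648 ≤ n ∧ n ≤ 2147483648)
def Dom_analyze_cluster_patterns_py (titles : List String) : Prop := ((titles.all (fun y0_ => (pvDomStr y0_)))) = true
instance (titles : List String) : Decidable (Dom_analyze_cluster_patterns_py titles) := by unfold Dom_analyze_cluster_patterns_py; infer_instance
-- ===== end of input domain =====

-- B replaces A's loop+dict+max(scores, key=...) by structural recursion: score and best-pattern are computed by recursive functions over the keyword/pattern lists, the head winning ties via '>='; objective: alternative (recursive decomposition, same cost).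


-- the literal common_patterns table (identical in both Pythons)
def pvPatterns : List (String × List String) := [
  ("Backend", ["backend", "back-end", "server", "api", "database"]),
  ("Frontend", ["frontend", "front-end", "ui", "ux", "react", "angular", "vue"]),
  ("Full Stack", ["full stack", "full-stack", "fullstack"]),
  ("DevOps", ["devops", "sre", "cloud", "infrastructure", "deployment"]),
  ("Data", ["data", "analytics", "analysis", "bi", "database"]),
  ("ML/AI", ["machine learning", "ml", "ai", "artificial intelligence", "deep learning"]),
  ("Mobile", ["mobile", "android", "ios", "react native", "flutter"]),
  ("QA", ["qa", "test", "quality", "automation"])]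

-- ===== PORT A =====
-- A's sum(1 for keyword in keywords if keyword in title_text)
def pvScore (title_text : String) (keywords : List String) : Int :=
  keywords.foldl (fun acc kw => if PySem.Str.isIn kw title_text then acc + 1 else acc) 0

def analyze_cluster_patterns_py (titles : List String) : String :=
  let title_text := PySem.Str.lower (PySem.Str.join " " titles)
  let scores : PySem.Dict String Int :=
    pvPatterns.foldl (fun d pk => d.insert pk.1 (pvScore title_text pk.2)) PySem.Dict.empty
  if scores.items ≠ [] then
    match PySem.List.max? scores.keys (fun k => scores.getD k 0) with
    | some best_pattern =>
        if scores.getD best_pattern 0 > 0 then best_pattern ++ " Developer"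
        else "Software Engineer"
    | none => "Software Engineer"
  else "Software Engineer"

-- ===== PORT B =====
-- B's recursive score(kws): (1 if kws[0] in text else 0) + score(kws[1:])
def pvScoreRec (t : String) : List String → Int
  | [] => 0
  | k :: ks => (if PySem.Str.isIn k t then 1 else 0) + pvScoreRec t ks

-- B's recursive best(items): head vs best of the tail, head wins on '>='
def pvBest (t : String) : List (String × List String) → Option String × Int
  | [] => (none, 0)
  | p :: tl =>
      let b := pvBest t tl
      let s := pvScoreRec t p.2
      if s ≥ b.2 then (some p.1, s) else b

-- Python's best always carries a name (some _) whenever bs > 0, so f"{bp} Developer" never reads None; .getD "" is never hit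
def analyze_cluster_patterns_py_alt (titles : List String) : String :=
  let text := PySem.Str.lower (PySem.Str.join " " titles)
  let b := pvBest text pvPatterns
  if b.2 > 0 then b.1.getD "" ++ " Developer" else "Software Engineer"

-- ===== PRECONDITION & SPEC =====
def Spec_analyze_cluster_patterns_py (titles : List String) (out : String) : Prop := out = analyze_cluster_patterns_py_alt titles
instance (titles : List String) (out : String) : Decidable (Spec_analyze_cluster_patterns_py titles out) := by unfold Spec_analyze_cluster_patterns_py; infer_instance

-- ===== CLAIM (what is proved, stated in full; the proofs are below) =====
def Claim_equal_analyze_cluster_patterns_py : Prop := ∀ (titles : List String), Dom_analyze_cluster_patterns_py titles → Spec_analyze_cluster_patterns_py titles (analyze_cluster_patterns_py titles)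

-- ===== LEMMAS AND PROOFS =====

theorem pvScoreRec_nonneg (t : String) (l : List String) : 0 ≤ pvScoreRec t l := by
  induction l with
  | nil => simp [pvScoreRec]
  | cons k ks ih => simp only [pvScoreRec]; split <;> omega

-- A's foldl count equals B's recursive count
theorem pvScore_aux (t : String) (l : List String) (acc : Int) :
    l.foldl (fun a kw => if PySem.Str.isIn kw t then a + 1 else a) acc = acc + pvScoreRec t l := by
  induction l generalizing acc with
  | nil => simp [pvScoreRec]
  | cons k ks ih =>
      simp only [List.foldl_cons, pvScoreRec, ih]
      split <;> omega

theorem pvScore_eq_rec (t : String) (l : List String) : pvScore t l = pvScoreRec t l := by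
  simpa using pvScore_aux t l 0

-- A's max-by step (what PySem.List.max? folds, with key = val), named
def pvAstep (val : String → Int) (acc : Option String) (x : String) : Option String :=
  match acc with
  | none => some x
  | some m => if val m < val x then some x else some m

-- PySem.List.max? IS the first-maximal pick-fold (named, so rewrites match syntactically)
theorem max?_eq_foldl_pvAstep (val : String → Int) (ks : List String) :
    PySem.List.max? ks val = ks.foldl (pvAstep val) none := by
  unfold PySem.List.max?
  congr 1
  funext acc x
  cases acc <;> rfl

-- INVARIANT: A's left fold (strict '<', earlier key kept on ties) starting from an already-seen
-- argmax m marches in lock-step with B's right recursion pvBest (head wins on '≥'):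
-- either the tail's best never beats val m (and the fold keeps m), or the fold lands exactly
-- on the name and value pvBest reports for the tail.
theorem pv_inv2 (t : String) (val : String → Int) (ps : List (String × List String))
    (hps : ∀ p ∈ ps, val p.1 = pvScoreRec t p.2)
    (m : String) (hm : 0 ≤ val m) :
    ∃ m', (ps.map Prod.fst).foldl (pvAstep val) (some m) = some m'
      ∧ ((pvBest t ps).2 ≤ val m ∧ m' = m
         ∨ val m < (pvBest t ps).2 ∧ (pvBest t ps).1 = some m' ∧ val m' = (pvBest t ps).2) := by
  induction ps generalizing m with
  | nil => exact ⟨m, rfl, Or.inl ⟨hm, rfl⟩⟩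
  | cons p tl ih =>
      have hv : val p.1 = pvScoreRec t p.2 := hps p (by simp)
      have hs0 : 0 ≤ pvScoreRec t p.2 := pvScoreRec_nonneg t p.2
      simp only [List.map_cons, List.foldl_cons]
      by_cases hc1 : val m < val p.1
      · rw [show pvAstep val (some m) p.1 = some p.1 by simp [pvAstep, hc1]]
        obtain ⟨m', hfold, hrest⟩ :=
          ih (fun q hq => hps q (List.mem_cons_of_mem _ hq)) p.1 (by omega)
        refine ⟨m', hfold, ?_⟩
        simp only [pvBest]
        by_cases hc2 : pvScoreRec t p.2 ≥ (pvBest t tl).2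
        · rw [if_pos hc2]
          rcases hrest with ⟨hle, rfl⟩ | ⟨hlt, _, _⟩
          · exact Or.inr ⟨by omega, rfl, hv⟩
          · omega
        · rw [if_neg hc2]
          rcases hrest with ⟨hle, rfl⟩ | ⟨hlt, hbo, hval⟩
          · omega
          · exact Or.inr ⟨by omega, hbo, hval⟩
      · rw [show pvAstep val (some m) p.1 = some m by simp [pvAstep, hc1]]
        obtain ⟨m', hfold, hrest⟩ :=
          ih (fun q hq => hps q (List.mem_cons_of_mem _ hq)) m hm
        refine ⟨m', hfold, ?_⟩
        simp only [pvBest]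
        by_cases hc2 : pvScoreRec t p.2 ≥ (pvBest t tl).2
        · rw [if_pos hc2]
          rcases hrest with ⟨hle, rfl⟩ | ⟨hlt, hbo, hval⟩
          · exact Or.inl ⟨by omega, rfl⟩
          · omega
        · rw [if_neg hc2]
          exact hrest

-- the scores dict A builds, computed out: one literal assoc list (keys distinct, so insert only appends)
theorem pv_dict (t : String) :
    pvPatterns.foldl (fun (d : PySem.Dict String Int) pk => d.insert pk.1 (pvScore t pk.2)) PySem.Dict.empty
    = PySem.Dict.mk [
        ("Backend", pvScore t ["backend", "back-end", "server", "api", "database"]),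
        ("Frontend", pvScore t ["frontend", "front-end", "ui", "ux", "react", "angular", "vue"]),
        ("Full Stack", pvScore t ["full stack", "full-stack", "fullstack"]),
        ("DevOps", pvScore t ["devops", "sre", "cloud", "infrastructure", "deployment"]),
        ("Data", pvScore t ["data", "analytics", "analysis", "bi", "database"]),
        ("ML/AI", pvScore t ["machine learning", "ml", "ai", "artificial intelligence", "deep learning"]),
        ("Mobile", pvScore t ["mobile", "android", "ios", "react native", "flutter"]),
        ("QA", pvScore t ["qa", "test", "quality", "automation"])] := by
  simp [pvPatterns, List.foldl, PySem.Dict.insert, PySem.Dict.empty, PySem.Dict.contains]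

-- one step of pvBest, to unfold the head without unrolling the tail
theorem pvBest_cons (t : String) (p : String × List String) (tl : List (String × List String)) :
    pvBest t (p :: tl)
    = if pvScoreRec t p.2 ≥ (pvBest t tl).2 then (some p.1, pvScoreRec t p.2) else pvBest t tl := rfl

-- ===== VERDICT (by name: the statement is the Claim_ definition above) =====
theorem analyze_cluster_patterns_py_spec : Claim_equal_analyze_cluster_patterns_py := by
  intro titles _
  unfold Spec_analyze_cluster_patterns_py analyze_cluster_patterns_py analyze_cluster_patterns_py_alt
  generalize PySem.Str.lower (PySem.Str.join " " titles) = t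
  simp only [pv_dict t]
  set d : PySem.Dict String Int := PySem.Dict.mk [
        ("Backend", pvScore t ["backend", "back-end", "server", "api", "database"]),
        ("Frontend", pvScore t ["frontend", "front-end", "ui", "ux", "react", "angular", "vue"]),
        ("Full Stack", pvScore t ["full stack", "full-stack", "fullstack"]),
        ("DevOps", pvScore t ["devops", "sre", "cloud", "infrastructure", "deployment"]),
        ("Data", pvScore t ["data", "analytics", "analysis", "bi", "database"]),
        ("ML/AI", pvScore t ["machine learning", "ml", "ai", "artificial intelligence", "deep learning"]),
        ("Mobile", pvScore t ["mobile", "android", "ios", "react native", "flutter"]),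
        ("QA", pvScore t ["qa", "test", "quality", "automation"])] with hd
  have hkeys : d.keys = ["Backend", "Frontend", "Full Stack", "DevOps", "Data", "ML/AI", "Mobile", "QA"] := by
    rw [hd]; rfl
  rw [if_pos (by simp)]
  simp only [hkeys, max?_eq_foldl_pvAstep]
  rw [List.foldl_cons, show pvAstep (fun k => d.getD k 0) none "Backend" = some "Backend" from rfl]
  have hgB : d.getD "Backend" 0 = pvScore t ["backend", "back-end", "server", "api", "database"] := by
    rw [hd]; simp [PySem.Dict.getD, PySem.Dict.get?, List.find?]
  have hps : ∀ p ∈ ([("Frontend", ["frontend", "front-end", "ui", "ux", "react", "angular", "vue"]),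
       ("Full Stack", ["full stack", "full-stack", "fullstack"]),
       ("DevOps", ["devops", "sre", "cloud", "infrastructure", "deployment"]),
       ("Data", ["data", "analytics", "analysis", "bi", "database"]),
       ("ML/AI", ["machine learning", "ml", "ai", "artificial intelligence", "deep learning"]),
       ("Mobile", ["mobile", "android", "ios", "react native", "flutter"]),
       ("QA", ["qa", "test", "quality", "automation"])] : List (String × List String)),
      (fun k => d.getD k 0) p.1 = pvScoreRec t p.2 := by
    intro p hp
    fin_cases hp <;>
      (rw [hd]; simp [PySem.Dict.getD, PySem.Dict.get?, List.find?, pvScore_eq_rec])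
  have hm : (0 : Int) ≤ (fun k => d.getD k 0) "Backend" := by
    simp only [hgB, pvScore_eq_rec]
    exact pvScoreRec_nonneg t _
  obtain ⟨m', hfold, hrest⟩ := pv_inv2 t (fun k => d.getD k 0) _ hps "Backend" hm
  simp only [List.map_cons, List.map_nil] at hfold
  rw [hfold]
  -- B side: unfold pvBest one step on the literal pvPatterns
  conv_rhs => rw [pvPatterns]
  have hvB : (fun k => d.getD k 0) "Backend" = pvScoreRec t ["backend", "back-end", "server", "api", "database"] := by
    simp only [hgB, pvScore_eq_rec]
  set tl : List (String × List String) := [("Frontend", ["frontend", "front-end", "ui", "ux", "react", "angular", "vue"]),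
       ("Full Stack", ["full stack", "full-stack", "fullstack"]),
       ("DevOps", ["devops", "sre", "cloud", "infrastructure", "deployment"]),
       ("Data", ["data", "analytics", "analysis", "bi", "database"]),
       ("ML/AI", ["machine learning", "ml", "ai", "artificial intelligence", "deep learning"]),
       ("Mobile", ["mobile", "android", "ios", "react native", "flutter"]),
       ("QA", ["qa", "test", "quality", "automation"])] with htl
  rw [show (("Backend", ["backend", "back-end", "server", "api", "database"]) :: tl) = ("Backend", ["backend", "back-end", "server", "api", "database"]) :: tl from rfl, pvBest_cons]
  have hvB' : d.getD "Backend" 0 = pvScoreRec t ["backend", "back-end", "server", "api", "database"] := hvB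
  rcases hrest with ⟨hle, rfl⟩ | ⟨hlt, hbo, hval⟩
  · -- the fold kept "Backend"; on B's side the head wins the ≥ test
    have hsel : (if pvScoreRec t ["backend", "back-end", "server", "api", "database"] ≥ (pvBest t tl).2
        then ((some "Backend" : Option String), pvScoreRec t ["backend", "back-end", "server", "api", "database"])
        else pvBest t tl)
        = (some "Backend", pvScoreRec t ["backend", "back-end", "server", "api", "database"]) := by
      rw [if_pos (by rw [← hvB']; exact hle)]
    rw [hsel]
    show (if d.getD "Backend" 0 > 0 then "Backend" ++ " Developer" else "Software Engineer")
        = (if pvScoreRec t ["backend", "back-end", "server", "api", "database"] > 0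
            then "Backend" ++ " Developer" else "Software Engineer")
    rw [hvB']
  · -- the fold landed on the tail's best; on B's side the head loses the ≥ test
    have hsel : (if pvScoreRec t ["backend", "back-end", "server", "api", "database"] ≥ (pvBest t tl).2
        then ((some "Backend" : Option String), pvScoreRec t ["backend", "back-end", "server", "api", "database"])
        else pvBest t tl) = pvBest t tl := by
      rw [if_neg (by rw [← hvB']; omega)]
    rw [hsel]
    show (if d.getD m' 0 > 0 then m' ++ " Developer" else "Software Engineer")
        = (if (pvBest t tl).2 > 0 then (pvBest t tl).1.getD "" ++ " Developer" else "Software Engineer")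
    rw [hbo, ← hval]
    by_cases hpos : d.getD m' 0 > 0
    · rw [if_pos hpos, if_pos hpos]; rfl
    · rw [if_neg hpos, if_neg hpos]
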